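-- pv_equiv track=rewrite | github.com/alexandraback/datacollection | solutions_5686275109552128_1/Python/Nin0/pancakes.py | can_do
-- ===== SOURCE A (Python) =====
-- def can_do(n, p):
--     # O(d * P), P = max_i p_i
--     for r in range(n):  # r is the number of special minutes.
--         m = n - r  # Maximal allowed content on a plate.
--         special_left = r
--         for i in range(len(p)):
--             if p[i] <= m:
--                 break
--             special_moves = (p[i] // m) - 1
--             if p[i] % m != 0:
--                 special_moves += 1
--             special_left -= special_moves
--             if special_left < 0:
--                 break
--         if special_left >= 0:
--             return True
--     return False
-- ===== SOURCE B (Python) =====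
-- def can_do(n, p):
--     # Different algorithm: instead of trying every r (i.e. every cap m = n - r) and
--     # re-scanning the plates, emit for each plate O(sqrt(p_i)) harmonic-block range
--     # updates "cost += ceil(x/m)-1 for m in [lo, hi]" into a difference dict, then
--     # sweep the sorted breakpoints once; cost(m) is constant between breakpoints and
--     # m + cost(m) is minimized at a breakpoint, so checking breakpoints suffices.
--     if n <= 0:
--         return False
--     if not p or p[0] <= n:
--         return True
--     delta = {}
--     q = p[0]
--     for x in p:
--         if x < q:
--             q = x
--         M = q - 1 if q - 1 < n else n   # plate x is charged for caps m in [1, M]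
--         if M < 1:
--             break
--         m = 1
--         while m <= M:
--             v = -(-x // m)              # ceil(x/m), constant on the block
--             hi = (x - 1) // (v - 1)     # last m' with ceil(x/m') == v
--             if hi > M:
--                 hi = M
--             delta[m] = delta.get(m, 0) + (v - 1)
--             delta[hi + 1] = delta.get(hi + 1, 0) - (v - 1)
--             m = hi + 1
--     cost = 0
--     for m in sorted(delta):
--         if m > n:
--             break
--         cost += delta[m]
--         if m + cost <= n:
--             return True
--     return False
-- ===== Notes on version B (the rewrite author's own statement) =====
-- stated objective: alternative
-- what changed: B drops A's loop over all n candidate special-minute counts with an inner plate scan; instead it makes one pass over the plates emitting harmonic-block range updates (cost += ceil(x/m)-1 for every cap m in a block) into a difference dictionary, then sweeps the sorted breakpoints once with a prefix sum, which suffices because m + cost(m) is minimized at a breakpoint.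
import Mathlib
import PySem

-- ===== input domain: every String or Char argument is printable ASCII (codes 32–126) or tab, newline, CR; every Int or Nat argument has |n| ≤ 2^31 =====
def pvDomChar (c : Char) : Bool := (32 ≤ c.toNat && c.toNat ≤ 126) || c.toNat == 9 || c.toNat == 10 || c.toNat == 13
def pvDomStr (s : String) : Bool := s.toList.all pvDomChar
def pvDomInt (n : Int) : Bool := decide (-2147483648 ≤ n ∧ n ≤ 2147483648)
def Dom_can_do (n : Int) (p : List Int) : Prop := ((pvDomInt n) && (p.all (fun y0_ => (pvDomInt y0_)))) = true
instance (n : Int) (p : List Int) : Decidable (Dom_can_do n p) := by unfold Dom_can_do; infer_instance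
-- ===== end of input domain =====

-- B replaces A's scan of all n caps (each re-scanning the plates) by one pass over the
-- plates emitting harmonic-block range updates into a difference dict, then one sweep of
-- the sorted breakpoints; alternative algorithm, same result.

-- ===== PORT A =====
-- special_moves for one plate (the two statements of A's inner body)
def pvMoves (x m : Int) : Int :=
  if PySem.Int.mod x m ≠ 0 then (PySem.Int.floordiv x m - 1) + 1
  else PySem.Int.floordiv x m - 1

-- A's inner loop over the plates, with both breaks
def pvInnerA (m : Int) : List Int → Int → Int
  | [], sl => sl
  | x :: xs, sl =>
    if x ≤ m then sl
    else
      let sl' := sl - pvMoves x m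
      if sl' < 0 then sl' else pvInnerA m xs sl'

-- A's outer loop over r ∈ range(n) (the lazy range consumed by a counter),
-- returning True on the first feasible r
def pvOuterA (n : Int) (p : List Int) : Nat → Int → Bool
  | 0, _ => false
  | Nat.succ k, r =>
    if 0 ≤ pvInnerA (n - r) p r then true else pvOuterA n p k (r + 1)

def can_do (n : Int) (p : List Int) : Bool :=
  pvOuterA n p n.toNat 0

-- ===== PORT B =====
-- ceil(x/m) as Source B computes it: -(-x // m)
def pvCeil (x m : Int) : Int := -(PySem.Int.floordiv (-x) m)

-- Source B's inner while loop over the harmonic blocks of one plate; fuel makes the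
-- recursion total (each Python iteration advances m by at least 1, so fuel M suffices)
def pvBlocks (x M : Int) : Nat → Int → PySem.Dict Int Int → PySem.Dict Int Int
  | 0, _, d => d
  | Nat.succ fuel, m, d =>
    if m ≤ M then
      let v := pvCeil x m
      let hi0 := PySem.Int.floordiv (x - 1) (v - 1)
      let hi := if hi0 > M then M else hi0
      let d1 := d.insert m (d.getD m 0 + (v - 1))
      let d2 := d1.insert (hi + 1) (d1.getD (hi + 1) 0 - (v - 1))
      pvBlocks x M fuel (hi + 1) d2
    else d

-- Source B's loop over the plates, maintaining the running minimum q
def pvPlates (n : Int) : List Int → Int → PySem.Dict Int Int → PySem.Dict Int Int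
  | [], _, d => d
  | x :: xs, q, d =>
    let q' := if x < q then x else q
    let M := if q' - 1 < n then q' - 1 else n
    if M < 1 then d
    else pvPlates n xs q' (pvBlocks x M M.toNat 1 d)

-- Source B's final sweep over the sorted breakpoints, accumulating the prefix sum
def pvSweep (n : Int) (d : PySem.Dict Int Int) : List Int → Int → Bool
  | [], _ => false
  | m :: ms, cost =>
    if m > n then false
    else
      let cost' := cost + d.getD m 0
      if m + cost' ≤ n then true else pvSweep n d ms cost'

def can_do_alt (n : Int) (p : List Int) : Bool :=
  if n ≤ 0 then false
  else
    match p with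
    | [] => true
    | p0 :: _ =>
      if p0 ≤ n then true
      else
        let d := pvPlates n p p0 PySem.Dict.empty
        pvSweep n d (PySem.List.sorted d.keys (fun k => k) false) 0

-- ===== PRECONDITION & SPEC =====
def Spec_can_do (n : Int) (p : List Int) (out : Bool) : Prop := out = can_do_alt n p
instance (n : Int) (p : List Int) (out : Bool) : Decidable (Spec_can_do n p out) := by unfold Spec_can_do; infer_instance

-- ===== CLAIM (what is proved, stated in full; the proofs are below) =====
def Claim_equal_can_do : Prop := ∀ (n : Int) (p : List Int), Dom_can_do n p → Spec_can_do n p (can_do n p)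

-- ===== LEMMAS AND PROOFS =====

-- the special-move count of A's inner loop, break included, as a function
def pvCost (m : Int) : List Int → Int
  | [] => 0
  | x :: xs => if x ≤ m then 0 else pvMoves x m + pvCost m xs

-- sum of the difference dict over the keys ≤ m (the value "cost" the sweep reaches at m)
def pvFsum (d : PySem.Dict Int Int) (m : Int) : Int :=
  ((d.keys.filter (fun k => decide (k ≤ m))).map (fun k => d.getD k 0)).sum

theorem pvMoves_pos (x m : Int) (hm : 0 < m) (hx : m < x) : 1 ≤ pvMoves x m := by
  have hqr := PySem.Int.floordiv_mul_add_mod x m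
  have hr0 := PySem.Int.mod_nonneg x hm
  have hrm := PySem.Int.mod_lt x hm
  unfold pvMoves
  set q := PySem.Int.floordiv x m with hq
  set r := PySem.Int.mod x m with hr
  split_ifs with h
  · by_contra hc
    rw [not_le] at hc
    have hqm : q * m ≤ 0 := mul_nonpos_iff.mpr (Or.inr ⟨by omega, hm.le⟩)
    linarith
  · simp only [not_not] at h
    by_contra hc
    rw [not_le] at hc
    have hqm : q * m ≤ 1 * m := mul_le_mul_of_nonneg_right (by omega) hm.le
    linarith

theorem pvMoves_eq_ceil (x m : Int) (hm : 0 < m) : pvMoves x m + 1 = pvCeil x m := by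
  have hqr := PySem.Int.floordiv_mul_add_mod x m
  have hr0 := PySem.Int.mod_nonneg x hm
  have hrm := PySem.Int.mod_lt x hm
  symm
  unfold pvMoves pvCeil
  set q := PySem.Int.floordiv x m with hq
  set r := PySem.Int.mod x m with hr
  split_ifs with h
  · have hr1 : 0 < r := lt_of_le_of_ne hr0 (Ne.symm h)
    rw [PySem.Int.neg_floordiv_neg_eq_iff_of_pos hm]
    have e1 : (q - 1 + 1 + 1 - 1) * m = q * m := by ring
    have e2 : (q - 1 + 1 + 1) * m = q * m + m := by ring
    rw [e1, e2]
    constructor <;> linarith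
  · simp only [not_not] at h
    rw [PySem.Int.neg_floordiv_neg_eq_iff_of_pos hm]
    have e1 : (q - 1 + 1 - 1) * m = q * m - m := by ring
    have e2 : (q - 1 + 1) * m = q * m := by ring
    rw [e1, e2]
    constructor <;> linarith

theorem pvCost_nonneg (m : Int) (hm : 0 < m) (p : List Int) : 0 ≤ pvCost m p := by
  induction p with
  | nil => simp [pvCost]
  | cons x xs ih =>
    simp only [pvCost]
    split_ifs with h
    · omega
    · have := pvMoves_pos x m hm (by omega)
      omega

theorem pvInnerA_iff (m : Int) (hm : 0 < m) (p : List Int) :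
    ∀ sl : Int, (0 ≤ pvInnerA m p sl ↔ pvCost m p ≤ sl) := by
  induction p with
  | nil => intro sl; simp [pvInnerA, pvCost]
  | cons x xs ih =>
    intro sl
    simp only [pvInnerA, pvCost]
    split_ifs with h1 h2
    · omega
    · have h1' : m < x := by omega
      have hmv := pvMoves_pos x m hm h1'
      have hc := pvCost_nonneg m hm xs
      constructor
      · intro h; omega
      · intro h; omega
    · rw [ih (sl - pvMoves x m)]
      omega

theorem pvOuterA_iff (n : Int) (p : List Int) :
    ∀ (k : Nat) (r0 : Int),
      (pvOuterA n p k r0 = true ↔ ∃ r, r0 ≤ r ∧ r < r0 + k ∧ 0 ≤ pvInnerA (n - r) p r) := by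
  intro k
  induction k with
  | zero =>
    intro r0
    simp only [pvOuterA]
    constructor
    · intro h; exact absurd h (by simp)
    · rintro ⟨r, h1, h2, _⟩; omega
  | succ k ih =>
    intro r0
    simp only [pvOuterA]
    split_ifs with hfeas
    · constructor
      · intro _; exact ⟨r0, le_refl r0, by omega, hfeas⟩
      · intro _; rfl
    · rw [ih (r0 + 1)]
      constructor
      · rintro ⟨r, h1, h2, h3⟩; exact ⟨r, by omega, by omega, h3⟩
      · rintro ⟨r, h1, h2, h3⟩
        rcases eq_or_lt_of_le h1 with rfl | h1'
        · exact absurd h3 hfeas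
        · exact ⟨r, by omega, by omega, h3⟩

theorem canA_iff (n : Int) (p : List Int) :
    can_do n p = true ↔ ∃ m, 1 ≤ m ∧ m ≤ n ∧ pvCost m p + m ≤ n := by
  unfold can_do
  rw [pvOuterA_iff n p n.toNat 0]
  constructor
  · rintro ⟨r, hr0, hrn, hfeas⟩
    have hm : 0 < n - r := by omega
    rw [pvInnerA_iff (n - r) hm p r] at hfeas
    exact ⟨n - r, by omega, by omega, by omega⟩
  · rintro ⟨m, hm1, hmn, hfeas⟩
    have hm : 0 < m := by omega
    refine ⟨n - m, by omega, by omega, ?_⟩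
    rw [show n - (n - m) = m by omega, pvInnerA_iff m hm p (n - m)]
    omega

-- ceil bounds
theorem pvCeil_bounds (x m : Int) (hm : 0 < m) :
    (pvCeil x m - 1) * m < x ∧ x ≤ pvCeil x m * m := by
  exact (PySem.Int.neg_floordiv_neg_eq_iff_of_pos hm).mp rfl

theorem pvCeil_two_le (x m : Int) (hm : 0 < m) (hx : m < x) : 2 ≤ pvCeil x m := by
  have hb := (pvCeil_bounds x m hm).2
  by_contra hc
  rw [not_le] at hc
  have : pvCeil x m * m ≤ 1 * m := mul_le_mul_of_nonneg_right (by omega) hm.le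
  linarith

-- sum over a nodup list where one element's value is bumped by w
theorem pv_sum_map_update {l : List Int} (hnd : l.Nodup) (g : Int → Int) (k w : Int) :
    (l.map (fun j => if j = k then g j + w else g j)).sum
      = (l.map g).sum + (if k ∈ l then w else 0) := by
  induction l with
  | nil => simp
  | cons a t ih =>
    have hnd' : t.Nodup := hnd.of_cons
    simp only [List.map_cons, List.sum_cons, List.mem_cons]
    by_cases hak : a = k
    · subst hak
      have hknt : a ∉ t := (List.nodup_cons.mp hnd).1
      rw [if_pos rfl, List.map_congr_left (fun j hj => if_neg (by rintro rfl; exact hknt hj))]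
      simp [hknt]
      ring
    · rw [if_neg hak, ih hnd']
      have hka : ¬ k = a := fun h => hak h.symm
      by_cases hkt : k ∈ t
      · simp only [hkt, if_pos, or_true]
        ring
      · simp [hkt, hka]

-- Fsum after an "delta[k] = delta.get(k,0) + w" style insert
theorem pvFsum_insert_add (d : PySem.Dict Int Int) (hnd : d.keys.Nodup) (k w m : Int) :
    pvFsum (d.insert k (d.getD k 0 + w)) m = pvFsum d m + (if k ≤ m then w else 0) := by
  unfold pvFsum
  by_cases hc : d.contains k
  · rw [PySem.Dict.keys_insert_of_contains d _ hc]
    have hmemk : k ∈ d.keys := (PySem.Dict.contains_iff_mem_keys d k).mp hc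
    have hmap : (d.keys.filter (fun j => decide (j ≤ m))).map
          (fun j => (d.insert k (d.getD k 0 + w)).getD j 0)
        = (d.keys.filter (fun j => decide (j ≤ m))).map
          (fun j => if j = k then (fun j' => d.getD j' 0) j + w else (fun j' => d.getD j' 0) j) := by
      apply List.map_congr_left
      intro j hj
      rw [PySem.Dict.getD_insert]
      by_cases hjk : j = k
      · subst hjk; simp
      · simp [hjk]
    rw [hmap, pv_sum_map_update (hnd.filter _) (fun j => d.getD j 0) k w]
    congr 1
    by_cases hkm : k ≤ m
    · rw [if_pos hkm, if_pos (List.mem_filter.mpr ⟨hmemk, by simpa using hkm⟩)]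
    · rw [if_neg hkm, if_neg (fun h => hkm (by simpa using (List.mem_filter.mp h).2))]
  · have hc' : d.contains k = false := by simpa using hc
    rw [PySem.Dict.keys_insert_of_not_contains d _ hc']
    have hknot : k ∉ d.keys := fun h => hc ((PySem.Dict.contains_iff_mem_keys d k).mpr h)
    rw [List.filter_append]
    have hmap : ((d.keys.filter (fun j => decide (j ≤ m))).map
          (fun j => (d.insert k (d.getD k 0 + w)).getD j 0))
        = (d.keys.filter (fun j => decide (j ≤ m))).map (fun j => d.getD j 0) := by
      apply List.map_congr_left
      intro j hj
      rw [PySem.Dict.getD_insert]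
      rw [if_neg (by rintro rfl; exact hknot (List.mem_filter.mp hj).1)]
    rw [List.map_append, List.sum_append, hmap]
    congr 1
    have hg0 : d.getD k 0 = 0 := PySem.Dict.getD_of_not_contains d 0 hc'
    by_cases hkm : k ≤ m
    · simp [hkm, PySem.Dict.getD_insert, hg0]
    · simp [hkm]

theorem keys_pvBlocks_mono (x M : Int) :
    ∀ (fuel : Nat) (m0 : Int) (d : PySem.Dict Int Int) (k : Int),
      k ∈ d.keys → k ∈ (pvBlocks x M fuel m0 d).keys := by
  intro fuel
  induction fuel with
  | zero => intro m0 d k h; exact h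
  | succ fuel ih =>
    intro m0 d k h
    simp only [pvBlocks]
    by_cases hm : m0 ≤ M
    · rw [if_pos hm]
      exact ih _ _ k (by
        rw [PySem.Dict.mem_keys_insert]
        exact Or.inr (by rw [PySem.Dict.mem_keys_insert]; exact Or.inr h))
    · rw [if_neg hm]; exact h

theorem nodup_keys_pvBlocks (x M : Int) :
    ∀ (fuel : Nat) (m0 : Int) (d : PySem.Dict Int Int),
      d.keys.Nodup → (pvBlocks x M fuel m0 d).keys.Nodup := by
  intro fuel
  induction fuel with
  | zero => intro m0 d h; exact h
  | succ fuel ih =>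
    intro m0 d h
    simp only [pvBlocks]
    by_cases hm : m0 ≤ M
    · rw [if_pos hm]
      exact ih _ _ (PySem.Dict.nodup_keys_insert _ _ _ (PySem.Dict.nodup_keys_insert _ _ _ h))
    · rw [if_neg hm]; exact h

theorem pvHi_ge (x m : Int) (hm : 0 < m) (hx : m < x) :
    m ≤ PySem.Int.floordiv (x - 1) (pvCeil x m - 1) := by
  have h2 := pvCeil_two_le x m hm hx
  have hb := (pvCeil_bounds x m hm).1
  rw [PySem.Int.le_floordiv_iff_mul_le (by omega)]
  nlinarith

theorem keys_pos_pvBlocks (x M : Int) (hMx : M < x) :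
    ∀ (fuel : Nat) (m0 : Int) (d : PySem.Dict Int Int), 1 ≤ m0 →
      (∀ k ∈ d.keys, 1 ≤ k) → ∀ k ∈ (pvBlocks x M fuel m0 d).keys, 1 ≤ k := by
  intro fuel
  induction fuel with
  | zero => intro m0 d _ h; exact h
  | succ fuel ih =>
    intro m0 d hm0 h
    simp only [pvBlocks]
    by_cases hm : m0 ≤ M
    · rw [if_pos hm]
      have hge := pvHi_ge x m0 (by omega) (by omega)
      refine ih _ _ (by split_ifs <;> omega) ?_
      intro k hk
      rw [PySem.Dict.mem_keys_insert] at hk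
      rcases hk with rfl | hk
      · split_ifs <;> omega
      · rw [PySem.Dict.mem_keys_insert] at hk
        rcases hk with rfl | hk
        · omega
        · exact h k hk
    · rw [if_neg hm]; exact h

-- the contribution of one plate's block loop to the prefix sums
theorem pvCeil_const_on_block (x m m' : Int) (hm : 0 < m) (hx : m < x) (h1 : m ≤ m')
    (h2 : m' ≤ PySem.Int.floordiv (x - 1) (pvCeil x m - 1)) : pvCeil x m' = pvCeil x m := by
  have h2c := pvCeil_two_le x m hm hx
  have hb := pvCeil_bounds x m hm
  have hup : m' * (pvCeil x m - 1) ≤ x - 1 := (PySem.Int.le_floordiv_iff_mul_le (by omega)).mp h2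
  show -PySem.Int.floordiv (-x) m' = pvCeil x m
  rw [PySem.Int.neg_floordiv_neg_eq_iff_of_pos (show (0:Int) < m' by omega)]
  constructor
  · nlinarith [hb.1, hb.2]
  · nlinarith [hb.1, hb.2]

theorem pvFsum_pvBlocks (x M : Int) (hMx : M < x) :
    ∀ (fuel : Nat) (m0 : Int) (d : PySem.Dict Int Int), 1 ≤ m0 →
      (M + 1 - m0).toNat ≤ fuel → d.keys.Nodup → ∀ m',
      pvFsum (pvBlocks x M fuel m0 d) m'
        = pvFsum d m' + (if m0 ≤ m' ∧ m' ≤ M then pvCeil x m' - 1 else 0) := by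
  intro fuel
  induction fuel with
  | zero =>
    intro m0 d hm0 hfuel hnd m'
    have : M < m0 := by omega
    simp only [pvBlocks]
    rw [if_neg (by omega)]
    omega
  | succ fuel ih =>
    intro m0 d hm0 hfuel hnd m'
    simp only [pvBlocks]
    by_cases hm : m0 ≤ M
    · rw [if_pos hm]
      have hm0x : m0 < x := by omega
      have hc2 : 2 ≤ pvCeil x m0 := pvCeil_two_le x m0 (by omega) hm0x
      have hge : m0 ≤ PySem.Int.floordiv (x - 1) (pvCeil x m0 - 1) := pvHi_ge x m0 (by omega) hm0x
      set c := pvCeil x m0 with hc_def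
      set hi0 := PySem.Int.floordiv (x - 1) (c - 1) with hhi0_def
      set hi := if hi0 > M then M else hi0 with hhi_def
      have hhi1 : m0 ≤ hi := by rw [hhi_def]; split_ifs <;> omega
      have hhi2 : hi ≤ M := by rw [hhi_def]; split_ifs <;> omega
      have hhi3 : hi ≤ hi0 := by rw [hhi_def]; split_ifs <;> omega
      set d1 := d.insert m0 (d.getD m0 0 + (c - 1)) with hd1_def
      have hsub : d1.getD (hi + 1) 0 - (c - 1) = d1.getD (hi + 1) 0 + (-(c - 1)) := by ring
      rw [hsub]
      have hnd1 : d1.keys.Nodup := PySem.Dict.nodup_keys_insert _ _ _ hnd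
      have hnd2 : ((d1.insert (hi + 1) (d1.getD (hi + 1) 0 + (-(c - 1))))).keys.Nodup :=
        PySem.Dict.nodup_keys_insert _ _ _ hnd1
      rw [ih (hi + 1) _ (by omega) (by omega) hnd2 m']
      rw [pvFsum_insert_add d1 hnd1 (hi + 1) (-(c - 1)) m']
      rw [pvFsum_insert_add d hnd m0 (c - 1) m']
      rcases lt_or_ge m' m0 with h1 | h1
      · rw [if_neg (by omega), if_neg (by omega), if_neg (by omega), if_neg (by omega)]
        ring
      · rcases le_or_gt m' hi with h2 | h2
        · have hceq : pvCeil x m' = c :=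
            pvCeil_const_on_block x m0 m' (by omega) hm0x h1 (by rw [← hc_def]; omega)
          rw [if_pos h1, if_neg (by omega), if_neg (by omega), if_pos ⟨h1, by omega⟩, hceq]
          ring
        · rcases le_or_gt m' M with h3 | h3
          · rw [if_pos h1, if_pos (by omega), if_pos ⟨by omega, h3⟩, if_pos ⟨h1, h3⟩]
            ring
          · rw [if_pos h1, if_pos (by omega), if_neg (by omega), if_neg (by omega)]
            ring
    · rw [if_neg hm]
      rw [if_neg (by omega)]
      omega

theorem keys_pvPlates_mono (n : Int) :
    ∀ (xs : List Int) (q : Int) (d : PySem.Dict Int Int) (k : Int),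
      k ∈ d.keys → k ∈ (pvPlates n xs q d).keys := by
  intro xs
  induction xs with
  | nil => intro q d k h; exact h
  | cons x xs ih =>
    intro q d k h
    simp only [pvPlates]
    split_ifs <;> first
      | exact h
      | exact ih _ _ k (keys_pvBlocks_mono x _ _ _ _ k h)

theorem nodup_keys_pvPlates (n : Int) :
    ∀ (xs : List Int) (q : Int) (d : PySem.Dict Int Int),
      d.keys.Nodup → (pvPlates n xs q d).keys.Nodup := by
  intro xs
  induction xs with
  | nil => intro q d h; exact h
  | cons x xs ih =>
    intro q d h
    simp only [pvPlates]
    split_ifs <;> first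
      | exact h
      | exact ih _ _ (nodup_keys_pvBlocks x _ _ _ _ h)

theorem keys_pos_pvPlates (n : Int) :
    ∀ (xs : List Int) (q : Int) (d : PySem.Dict Int Int),
      (∀ k ∈ d.keys, 1 ≤ k) → ∀ k ∈ (pvPlates n xs q d).keys, 1 ≤ k := by
  intro xs
  induction xs with
  | nil => intro q d h; exact h
  | cons x xs ih =>
    intro q d h
    simp only [pvPlates]
    split_ifs <;> first
      | exact h
      | exact ih _ _ (keys_pos_pvBlocks x _ (by omega) _ _ _ (by omega) h)

-- the prefix-sum of the finished dict is exactly A's (break-truncated) cost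
theorem pvFsum_pvPlates (n : Int) :
    ∀ (xs : List Int) (q : Int) (d : PySem.Dict Int Int), d.keys.Nodup →
      ∀ m', 1 ≤ m' → m' ≤ n →
      pvFsum (pvPlates n xs q d) m'
        = pvFsum d m' + (if m' < q then pvCost m' xs else 0) := by
  intro xs
  induction xs with
  | nil =>
    intro q d hnd m' h1 h2
    simp only [pvPlates, pvCost]
    split_ifs <;> omega
  | cons x xs ih =>
    intro q d hnd m' h1 h2
    simp only [pvPlates]
    set q1 := if x < q then x else q with hq1_def
    set M : Int := if q1 - 1 < n then q1 - 1 else n with hM_def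
    have hq1cases : q1 = x ∨ (q1 = q ∧ q ≤ x) := by
      rw [hq1_def]; split_ifs with hh
      · exact Or.inl rfl
      · exact Or.inr ⟨rfl, by omega⟩
    have hq1le : q1 ≤ x := by omega
    have hq1q : q1 ≤ q := by rw [hq1_def]; split_ifs <;> omega
    have hMmin : ∀ z : Int, z ≤ M ↔ z ≤ q1 - 1 ∧ z ≤ n := by
      intro z; rw [hM_def]; split_ifs <;> omega
    by_cases hM1 : M < 1
    · rw [if_pos hM1]
      have hq11 : q1 ≤ 1 := by
        have := (hMmin M).mp (le_refl M)
        have h' := hMmin (1 : Int)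
        omega
      by_cases hmq : m' < q
      · rw [if_pos hmq]
        have hx_le : x ≤ m' := by omega
        simp only [pvCost]
        rw [if_pos hx_le]
        omega
      · rw [if_neg hmq]; omega
    · rw [if_neg hM1]
      have hM1' : 1 ≤ M := by omega
      have hMq1 : M ≤ q1 - 1 := ((hMmin M).mp (le_refl M)).1
      have hMn : M ≤ n := ((hMmin M).mp (le_refl M)).2
      have hMx : M < x := by omega
      have hndB := nodup_keys_pvBlocks x M M.toNat 1 d hnd
      rw [ih q1 _ hndB m' h1 h2]
      rw [pvFsum_pvBlocks x M hMx M.toNat 1 d (by omega) (by omega) hnd m']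
      by_cases hc1 : m' < q1
      · have hmM : m' ≤ M := (hMmin m').mpr ⟨by omega, h2⟩
        rw [if_pos ⟨h1, hmM⟩, if_pos hc1, if_pos (by omega)]
        simp only [pvCost]
        rw [if_neg (by omega)]
        have hmv := pvMoves_eq_ceil x m' (by omega)
        omega
      · rw [if_neg (fun hcon => hc1 (by omega)), if_neg hc1]
        by_cases hmq : m' < q
        · rw [if_pos hmq]
          have hq1x : q1 = x := by omega
          simp only [pvCost]
          rw [if_pos (by omega)]
          omega
        · rw [if_neg hmq]; omega

theorem one_mem_keys_pvPlates (n : Int) (x : Int) (xs : List Int) (q : Int)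
    (d : PySem.Dict Int Int) (hq : q ≤ x) (hn : 1 ≤ n) (hq1 : 1 < q) :
    (1 : Int) ∈ (pvPlates n (x :: xs) q d).keys := by
  simp only [pvPlates]
  have hq1' : (if x < q then x else q) = q := by rw [if_neg (by omega)]
  rw [hq1']
  set M : Int := if q - 1 < n then q - 1 else n with hM_def
  have hM1 : 1 ≤ M := by rw [hM_def]; split_ifs <;> omega
  rw [if_neg (by omega)]
  apply keys_pvPlates_mono
  rcases hMt : M.toNat with _ | k
  · omega
  · simp only [pvBlocks]
    rw [if_pos (by omega)]
    apply keys_pvBlocks_mono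
    rw [PySem.Dict.mem_keys_insert]
    exact Or.inr ((PySem.Dict.mem_keys_insert _ _ _ _).mpr (Or.inl rfl))

-- the sweep, over any ≤-sorted list, finds a feasible split point
theorem pvSweep_iff (n : Int) (d : PySem.Dict Int Int) :
    ∀ (L : List Int) (c : Int), L.Pairwise (· ≤ ·) →
      (pvSweep n d L c = true ↔
        ∃ l1 k l2, L = l1 ++ k :: l2 ∧ k ≤ n ∧
          k + (c + (((l1 ++ [k]).map (fun j => d.getD j 0)).sum)) ≤ n) := by
  intro L
  induction L with
  | nil =>
    intro c _
    simp only [pvSweep]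
    constructor
    · intro h; exact absurd h (by simp)
    · rintro ⟨l1, k, l2, heq, -, -⟩
      exact absurd heq (by simp)
  | cons m ms ih =>
    intro c hs
    have hhead : ∀ b ∈ ms, m ≤ b := (List.pairwise_cons.mp hs).1
    simp only [pvSweep]
    by_cases hmn : m > n
    · rw [if_pos hmn]
      constructor
      · intro h; exact absurd h (by simp)
      · rintro ⟨l1, k, l2, heq, hk, -⟩
        have hkmem : k ∈ m :: ms := by rw [heq]; simp
        rcases List.mem_cons.mp hkmem with rfl | hkms
        · omega
        · have := hhead k hkms; omega
    · rw [if_neg hmn]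
      by_cases hfeas : m + (c + d.getD m 0) ≤ n
      · rw [if_pos hfeas]
        constructor
        · intro _
          exact ⟨[], m, ms, rfl, by omega, by simpa using hfeas⟩
        · intro _; rfl
      · rw [if_neg hfeas]
        rw [ih (c + d.getD m 0) (List.Pairwise.of_cons hs)]
        constructor
        · rintro ⟨l1, k, l2, heq, hk, hsum⟩
          refine ⟨m :: l1, k, l2, by rw [heq]; simp, hk, ?_⟩
          simp only [List.cons_append, List.map_cons, List.sum_cons]
          omega
        · rintro ⟨l1, k, l2, heq, hk, hsum⟩
          cases l1 with
          | nil =>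
            simp only [List.nil_append] at heq
            obtain ⟨rfl, rfl⟩ : m = k ∧ ms = l2 := List.cons_eq_cons.mp heq
            simp only [List.nil_append, List.map_cons, List.map_nil, List.sum_cons,
              List.sum_nil] at hsum
            omega
          | cons a l1' =>
            simp only [List.cons_append] at heq
            obtain ⟨rfl, hms⟩ := List.cons_eq_cons.mp heq
            refine ⟨l1', k, l2, hms, hk, ?_⟩
            simp only [List.cons_append, List.map_cons, List.sum_cons] at hsum
            omega

-- the prefix sum the sweep accumulates is pvFsum at the current key
theorem pv_sorted_decomp_sum (g : Int → Int) (keys l1 l2 : List Int) (k : Int)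
    (hperm : (l1 ++ k :: l2).Perm keys) (hsort : (l1 ++ k :: l2).Pairwise (· < ·)) :
    ((keys.filter (fun j => decide (j ≤ k))).map g).sum = ((l1 ++ [k]).map g).sum := by
  have hp : (keys.filter (fun j => decide (j ≤ k))).Perm
      ((l1 ++ k :: l2).filter (fun j => decide (j ≤ k))) :=
    (hperm.filter (fun j => decide (j ≤ k))).symm
  rw [((hp.map g).sum_eq : _)]
  obtain ⟨h1, h2, hacross⟩ := List.pairwise_append.mp hsort
  have hl1 : ∀ a ∈ l1, a < k := fun a ha => hacross a ha k (List.mem_cons_self ..)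
  have hl2 : ∀ b ∈ l2, k < b := (List.pairwise_cons.mp h2).1
  rw [List.filter_append, List.filter_cons]
  rw [List.filter_eq_self.mpr (fun a ha => by simpa using (hl1 a ha).le)]
  simp only [decide_eq_true_eq, le_refl, if_pos]
  rw [List.filter_eq_nil_iff.mpr (fun b hb => by simpa using not_le.mpr (hl2 b hb))]

theorem canB_iff (n : Int) (p0 : Int) (ps : List Int) (hn : 1 ≤ n) (hp0 : n < p0) :
    (can_do_alt n (p0 :: ps) = true) ↔
      ∃ m, 1 ≤ m ∧ m ≤ n ∧ pvCost m (p0 :: ps) + m ≤ n := by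
  unfold can_do_alt
  rw [if_neg (by omega : ¬ n ≤ 0)]
  show (if p0 ≤ n then true else _) = true ↔ _
  rw [if_neg (by omega : ¬ p0 ≤ n)]
  show pvSweep n (pvPlates n (p0 :: ps) p0 PySem.Dict.empty)
      (PySem.List.sorted (pvPlates n (p0 :: ps) p0 PySem.Dict.empty).keys (fun k => k) false) 0 = true
    ↔ ∃ m, 1 ≤ m ∧ m ≤ n ∧ pvCost m (p0 :: ps) + m ≤ n
  set D := pvPlates n (p0 :: ps) p0 PySem.Dict.empty with hD_def
  have hnd : D.keys.Nodup := nodup_keys_pvPlates n _ _ _ PySem.Dict.nodup_keys_empty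
  have hpos : ∀ k ∈ D.keys, 1 ≤ k :=
    keys_pos_pvPlates n _ _ _ (by simp [PySem.Dict.keys_empty]) 
  have h1D : (1 : Int) ∈ D.keys :=
    one_mem_keys_pvPlates n p0 ps p0 _ (le_refl p0) hn (by omega)
  have hFs : ∀ m', 1 ≤ m' → m' ≤ n → pvFsum D m' = pvCost m' (p0 :: ps) := by
    intro m' h1 h2
    rw [hD_def, pvFsum_pvPlates n _ _ _ PySem.Dict.nodup_keys_empty m' h1 h2]
    have : pvFsum PySem.Dict.empty m' = 0 := by
      simp [pvFsum, PySem.Dict.keys_empty]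
    rw [this, if_pos (by omega)]
    omega
  set L := PySem.List.sorted D.keys (fun k => k) false with hL_def
  have hperm : L.Perm D.keys := PySem.List.sorted_perm D.keys (fun k => k) false
  have hle : L.Pairwise (· ≤ ·) := PySem.List.sorted_pairwise D.keys (fun k => k)
  have hndL : L.Nodup := hperm.nodup_iff.mpr hnd
  have hlt : L.Pairwise (· < ·) := (hle.and hndL).imp (fun h => lt_of_le_of_ne h.1 h.2)
  rw [pvSweep_iff n D L 0 hle]
  constructor
  · rintro ⟨l1, k, l2, heq, hk, hsum⟩
    have hkK : k ∈ D.keys := hperm.subset (by rw [heq]; simp)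
    have hk1 : 1 ≤ k := hpos k hkK
    refine ⟨k, hk1, hk, ?_⟩
    have hb := pv_sorted_decomp_sum (fun j => D.getD j 0) D.keys l1 l2 k
      (heq ▸ hperm) (heq ▸ hlt)
    have : pvFsum D k = ((l1 ++ [k]).map (fun j => D.getD j 0)).sum := hb
    rw [hFs k hk1 hk] at this
    omega
  · rintro ⟨m, hm1, hmn, hfeas⟩
    have h1mem : (1 : Int) ∈ D.keys.filter (fun j => decide (j ≤ m)) :=
      List.mem_filter.mpr ⟨h1D, by simpa using hm1⟩
    rcases hmax : (D.keys.filter (fun j => decide (j ≤ m))).max? with _ | k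
    · rw [List.max?_eq_none_iff.mp hmax] at h1mem
      exact absurd h1mem (by simp)
    · have hkmem : k ∈ D.keys.filter (fun j => decide (j ≤ m)) := List.max?_mem hmax
      have hkmax : ∀ b ∈ D.keys.filter (fun j => decide (j ≤ m)), b ≤ k :=
        (List.max?_le_iff hmax).mp (le_refl k)
      have hkK : k ∈ D.keys := (List.mem_filter.mp hkmem).1
      have hkm : k ≤ m := by simpa using (List.mem_filter.mp hkmem).2
      have hk1 : 1 ≤ k := hpos k hkK
      have hfilt : D.keys.filter (fun j => decide (j ≤ k))
          = D.keys.filter (fun j => decide (j ≤ m)) := by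
        apply List.filter_congr
        intro j hj
        by_cases hjm : j ≤ m
        · have hjk : j ≤ k := hkmax j (List.mem_filter.mpr ⟨hj, by simpa using hjm⟩)
          simp [hjk, hjm]
        · have hjk : ¬ j ≤ k := by omega
          simp [hjk, hjm]
      have hFkm : pvFsum D k = pvFsum D m := by
        unfold pvFsum; rw [hfilt]
      have hkL : k ∈ L := hperm.mem_iff.mpr hkK
      obtain ⟨l1, l2, heq⟩ := List.append_of_mem hkL
      refine ⟨l1, k, l2, heq, by omega, ?_⟩
      have hb := pv_sorted_decomp_sum (fun j => D.getD j 0) D.keys l1 l2 k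
        (heq ▸ hperm) (heq ▸ hlt)
      have hsumeq : ((l1 ++ [k]).map (fun j => D.getD j 0)).sum = pvFsum D k := hb.symm
      rw [hsumeq, hFkm, hFs m hm1 hmn]
      omega

theorem can_do_eq_alt (n : Int) (p : List Int) : can_do n p = can_do_alt n p := by
  by_cases hn : n ≤ 0
  · unfold can_do can_do_alt
    rw [show n.toNat = 0 by omega, if_pos hn]
    rfl
  · cases p with
    | nil =>
      unfold can_do_alt
      rw [if_neg hn]
      exact (canA_iff n []).mpr ⟨n, by omega, le_refl n, by simp [pvCost]⟩
    | cons p0 ps =>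
      by_cases hp0 : p0 ≤ n
      · have hA : can_do n (p0 :: ps) = true :=
          (canA_iff n (p0 :: ps)).mpr ⟨n, by omega, le_refl n, by simp [pvCost, hp0]⟩
        have hB : can_do_alt n (p0 :: ps) = true := by
          unfold can_do_alt
          rw [if_neg hn]
          show (if p0 ≤ n then true else _) = true
          rw [if_pos hp0]
        rw [hA, hB]
      · rw [Bool.eq_iff_iff, canA_iff n (p0 :: ps),
          canB_iff n p0 ps (by omega) (by omega)]

-- ===== VERDICT (by name: the statement is the Claim_ definition above) =====
theorem can_do_spec : Claim_equal_can_do := by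
  intro n p _
  unfold Spec_can_do
  exact can_do_eq_alt n p
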